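-- pv_equiv track=rewrite | github.com/kangtae210/leetCode | p_lv2/make_star_at_spot.py | solution
-- ===== SOURCE A (Python) =====
-- def solve(first, second):
--     A, B, E = first
--     C, D, F = second
--     target = A * D - B * C
--     if (target == 0):
--         return None
--
--
--     check1 = ((B*F - E*D) % target == 0)
--     check2 = ((E*C - A*F) % target == 0)
--
--     if check1 & check2:
--         x = (B*F - E*D) // target
--         y = (E*C - A*F) // target
--         return [x, y]
--
-- def solution(line):
--     intersection = []
--
--     # 방정식의 해 구하기
--     for i in range(len(line)):
--         for j in range(i, len(line)):
--             s = solve(line[i], line[j])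
--             if s != None:
--                 intersection.append(s)
--
--
--     intersection.sort(key= lambda x : x[1])
--     miny = intersection[0][1]
--     maxy = intersection[-1][1]
--     intersection.sort(key= lambda x : x[0])
--     minx = intersection[0][0]
--     maxx = intersection[-1][0]
--     answer = [["." for _ in range(minx, maxx+1)] for _ in range(miny, maxy+1)]
--
--     for i in range(len(intersection)):
--         x = intersection[i][0]
--         y = intersection[i][1]
--         answer[-y+maxy][x-minx] = "*"
--
--
--
--     return ["".join(answer[i]) for i in range(len(answer))]
-- ===== SOURCE B (Python) =====
-- def solve(first, second):
--     A, B, E = first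
--     C, D, F = second
--     target = A * D - B * C
--     if target == 0:
--         return None
--     num_x = B * F - E * D
--     num_y = E * C - A * F
--     if num_x % target == 0 and num_y % target == 0:
--         return (num_x // target, num_y // target)
--     return None
--
-- def solution(line):
--     pts = []
--     n = len(line)
--     for i in range(n):
--         for j in range(i, n):
--             s = solve(line[i], line[j])
--             if s is not None:
--                 pts.append(s)
--     # single linear pass over pts for the bounding box (A sorts twice instead)
--     x0, y0 = pts[0]
--     minx = maxx = x0
--     miny = maxy = y0
--     for x, y in pts[1:]:
--         if x < minx:
--             minx = x
--         if x > maxx: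
--             maxx = x
--         if y < miny:
--             miny = y
--         if y > maxy:
--             maxy = y
--     stars = set(pts)
--     return ["".join("*" if (x, y) in stars else "." for x in range(minx, maxx + 1))
--             for y in range(maxy, miny - 1, -1)]
-- ===== Notes on version B (the rewrite author's own statement) =====
-- stated objective: simpler
-- what changed: B keeps the O(n^2) pair loop but replaces A's two key-sorts plus endpoint reads with one linear pass accumulating minx/maxx/miny/maxy, and replaces the build-a-dot-grid-then-overwrite-cells mutation with a direct comprehension that emits '*' or '.' per cell via a set of intersection points.
import Mathlib
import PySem

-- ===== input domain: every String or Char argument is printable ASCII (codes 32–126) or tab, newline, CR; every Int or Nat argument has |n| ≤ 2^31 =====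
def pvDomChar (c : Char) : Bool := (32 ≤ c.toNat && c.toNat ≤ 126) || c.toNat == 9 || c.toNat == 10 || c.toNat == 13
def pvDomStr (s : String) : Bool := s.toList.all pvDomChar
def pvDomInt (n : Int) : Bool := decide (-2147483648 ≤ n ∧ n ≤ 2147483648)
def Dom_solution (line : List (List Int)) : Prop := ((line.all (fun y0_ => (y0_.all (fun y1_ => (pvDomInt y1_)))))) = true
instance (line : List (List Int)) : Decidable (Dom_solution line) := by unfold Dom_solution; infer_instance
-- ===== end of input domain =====

-- B replaces A's two sorts + grid mutation by a single linear bounds pass and a set-membership comprehension (return value only; A also leaves `line` unchanged).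

-- ===== PORT A =====
-- solve(first, second); the `| _, _ => none` arm is unreachable under Pre_ (Python raises ValueError unpacking a non-triple)
def solveA (first second : List Int) : Option (List Int) :=
  match first, second with
  | [A, B, E], [C, D, F] =>
    let target := A * D - B * C
    if target = 0 then none
    else
      let check1 := PySem.Int.mod (B*F - E*D) target == 0
      let check2 := PySem.Int.mod (E*C - A*F) target == 0
      if check1 && check2 then
        some [PySem.Int.floordiv (B*F - E*D) target, PySem.Int.floordiv (E*C - A*F) target]
      else none
  | _, _ => none

-- the double loop building `intersection`
def interA (line : List (List Int)) : List (List Int) :=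
  (PySem.List.pyRange 0 (line.length : Int) 1).foldl (fun acc i =>
    (PySem.List.pyRange i (line.length : Int) 1).foldl (fun acc j =>
      match solveA (PySem.List.pyGetD line i []) (PySem.List.pyGetD line j []) with
      | some s => acc ++ [s]
      | none => acc) acc) []

def solution (line : List (List Int)) : List String :=
  let s1 := PySem.List.sorted (interA line) (fun x => PySem.List.pyGetD x 1 0) false
  match PySem.List.pyGet? s1 0, PySem.List.pyGet? s1 (-1) with
  | some firsty, some lasty =>
    let miny := PySem.List.pyGetD firsty 1 0
    let maxy := PySem.List.pyGetD lasty 1 0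
    let s2 := PySem.List.sorted s1 (fun x => PySem.List.pyGetD x 0 0) false
    match PySem.List.pyGet? s2 0, PySem.List.pyGet? s2 (-1) with
    | some firstx, some lastx =>
      let minx := PySem.List.pyGetD firstx 0 0
      let maxx := PySem.List.pyGetD lastx 0 0
      let answer0 := (PySem.List.pyRange miny (maxy+1) 1).map (fun _ =>
        (PySem.List.pyRange minx (maxx+1) 1).map (fun _ => "."))
      let answer := s2.foldl (fun ans p =>
        let x := PySem.List.pyGetD p 0 0
        let y := PySem.List.pyGetD p 1 0
        PySem.List.pySetD ans (-y + maxy)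
          (PySem.List.pySetD (PySem.List.pyGetD ans (-y + maxy) []) (x - minx) "*")) answer0
      (PySem.List.pyRange 0 (answer.length : Int) 1).map (fun i =>
        PySem.Str.join "" (PySem.List.pyGetD answer i []))
    | _, _ => []  -- unreachable: s2 is a permutation of the nonempty s1
  | _, _ => []  -- Python raises IndexError here (intersection empty); excluded by Pre_

-- ===== PORT B =====
-- B's solve, returning a tuple; `| _, _ => none` unreachable under Pre_ (Python ValueError)
def solveB (first second : List Int) : Option (Int × Int) :=
  match first, second with
  | [A, B, E], [C, D, F] =>
    let target := A * D - B * C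
    if target = 0 then none
    else
      let numx := B*F - E*D
      let numy := E*C - A*F
      if PySem.Int.mod numx target = 0 ∧ PySem.Int.mod numy target = 0 then
        some (PySem.Int.floordiv numx target, PySem.Int.floordiv numy target)
      else none
  | _, _ => none

def ptsB (line : List (List Int)) : List (Int × Int) :=
  (PySem.List.pyRange 0 (line.length : Int) 1).foldl (fun acc i =>
    (PySem.List.pyRange i (line.length : Int) 1).foldl (fun acc j =>
      match solveB (PySem.List.pyGetD line i []) (PySem.List.pyGetD line j []) with
      | some s => acc ++ [s]
      | none => acc) acc) []

def solution_alt (line : List (List Int)) : List String :=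
  match ptsB line with
  | [] => []  -- Python raises IndexError (pts[0]); excluded by Pre_
  | p0 :: rest =>
    let bounds := rest.foldl (fun (b : Int × Int × Int × Int) (p : Int × Int) =>
      (if p.1 < b.1 then p.1 else b.1,
       if p.1 > b.2.1 then p.1 else b.2.1,
       if p.2 < b.2.2.1 then p.2 else b.2.2.1,
       if p.2 > b.2.2.2 then p.2 else b.2.2.2)) (p0.1, p0.1, p0.2, p0.2)
    let minx := bounds.1
    let maxx := bounds.2.1
    let miny := bounds.2.2.1
    let maxy := bounds.2.2.2
    let stars := PySem.Set.ofList (p0 :: rest)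
    (PySem.List.pyRange maxy (miny - 1) (-1)).map (fun y =>
      PySem.Str.join "" ((PySem.List.pyRange minx (maxx+1) 1).map (fun x =>
        if PySem.Set.contains stars (x, y) then "*" else ".")))

-- ===== PRECONDITION & SPEC =====
-- whether two lines (as coefficient triples) have a unique integer intersection point
def pvSolvable (a b : List Int) : Bool :=
  match a, b with
  | [A, B, E], [C, D, F] =>
    (A*D - B*C != 0) &&
    (PySem.Int.mod (B*F - E*D) (A*D - B*C) == 0) &&
    (PySem.Int.mod (E*C - A*F) (A*D - B*C) == 0)
  | _, _ => false

-- Pre_ excludes exactly the inputs where the Python A raises: a non-triple element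
-- (ValueError on unpacking) or no pair of lines with an integer intersection
-- (IndexError on intersection[0]); B raises IndexError on the latter too.
def Pre_solution (line : List (List Int)) : Prop :=
  (∀ l ∈ line, l.length = 3) ∧ (∃ a ∈ line, ∃ b ∈ line, pvSolvable a b = true)
instance (line : List (List Int)) : Decidable (Pre_solution line) := by
  unfold Pre_solution; infer_instance

def pvWitness_solution : List (List Int) := [[1, 0, 0], [0, 1, 0]]

def Spec_solution (line : List (List Int)) (out : List String) : Prop := out = solution_alt line
instance (line : List (List Int)) (out : List String) : Decidable (Spec_solution line out) := by
  unfold Spec_solution; infer_instance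

-- ===== CLAIM (what is proved, stated in full; the proofs are below) =====
def Claim_equal_solution : Prop := ∀ (line : List (List Int)), Dom_solution line → Pre_solution line → Spec_solution line (solution line)

-- ===== LEMMAS AND PROOFS =====

theorem solveA_eq (a b : List Int) : solveA a b = (solveB a b).map (fun p => [p.1, p.2]) := by
  rcases a with _|⟨A,_|⟨B,_|⟨E,_|⟨x,t⟩⟩⟩⟩ <;> rcases b with _|⟨C,_|⟨D,_|⟨F,_|⟨y,s⟩⟩⟩⟩ <;>
    simp [solveA, solveB] <;> split_ifs <;> simp_all

theorem pvSolvable_isSome (a b : List Int) : pvSolvable a b = (solveB a b).isSome := by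
  rcases a with _|⟨A,_|⟨B,_|⟨E,_|⟨x,t⟩⟩⟩⟩ <;> rcases b with _|⟨C,_|⟨D,_|⟨F,_|⟨y,s⟩⟩⟩⟩ <;>
    simp [pvSolvable, solveB] <;> split_ifs <;> simp_all

theorem pvSolvable_symm (a b : List Int) (h : pvSolvable a b = true) : pvSolvable b a = true := by
  rcases a with _|⟨A,_|⟨B,_|⟨E,_|⟨x,t⟩⟩⟩⟩ <;> rcases b with _|⟨C,_|⟨D,_|⟨F,_|⟨y,s⟩⟩⟩⟩ <;>
    simp_all [pvSolvable, PySem.Int.mod_eq_zero_iff_dvd]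
  obtain ⟨⟨h0, h1⟩, h2⟩ := h
  refine ⟨⟨fun hc => h0 (by linarith [hc, show C*B - D*A = -(A*D - B*C) from by ring]), ?_⟩, ?_⟩
  · have e2 : (C*B - D*A) = -(A*D - B*C) := by ring
    have e3 : (D*E - F*B) = -(B*F - E*D) := by ring
    rw [e2, e3, neg_dvd, dvd_neg]; exact h1
  · have e2 : (C*B - D*A) = -(A*D - B*C) := by ring
    have e3 : (F*A - C*E) = -(E*C - A*F) := by ring
    rw [e2, e3, neg_dvd, dvd_neg]; exact h2

theorem inter_eq (line : List (List Int)) : interA line = (ptsB line).map (fun p => [p.1, p.2]) := by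
  unfold interA ptsB
  generalize (PySem.List.pyRange 0 (line.length:Int) 1) = L
  suffices h : ∀ (L : List Int) (acc : List (Int × Int)),
      L.foldl (fun acc i => (PySem.List.pyRange i (line.length:Int) 1).foldl (fun acc j =>
        match solveA (PySem.List.pyGetD line i []) (PySem.List.pyGetD line j []) with
        | some s => acc ++ [s] | none => acc) acc) (acc.map (fun p => [p.1,p.2]))
      = (L.foldl (fun acc i => (PySem.List.pyRange i (line.length:Int) 1).foldl (fun acc j =>
        match solveB (PySem.List.pyGetD line i []) (PySem.List.pyGetD line j []) with
        | some s => acc ++ [s] | none => acc) acc) acc).map (fun p => [p.1,p.2]) by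
    simpa using h L []
  intro L
  induction L with
  | nil => intro acc; simp
  | cons i L ih =>
    intro acc
    simp only [List.foldl_cons]
    rw [← ih]
    congr 1
    generalize (PySem.List.pyRange i (line.length:Int) 1) = M
    induction M generalizing acc with
    | nil => simp
    | cons j M ihm =>
      simp only [List.foldl_cons]
      rw [solveA_eq]
      cases hsb : solveB (PySem.List.pyGetD line i []) (PySem.List.pyGetD line j []) with
      | none => simpa [hsb] using ihm acc
      | some q =>
        simp only [hsb]
        simpa using ihm (acc ++ [q])
theorem foldl_step_sub {α β : Type} (step : List α → β → List α)
    (hs : ∀ acc i, acc ⊆ step acc i) :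
    ∀ (L : List β) (acc : List α), acc ⊆ L.foldl step acc := by
  intro L
  induction L with
  | nil => intro acc; simp
  | cons i L ih => intro acc; exact (hs acc i).trans (ih (step acc i))

theorem mem_foldl_step {α β : Type} (step : List α → β → List α)
    (hs : ∀ acc i, acc ⊆ step acc i) {q : α} {i : β}
    (hq : ∀ acc, q ∈ step acc i) :
    ∀ (L : List β), i ∈ L → ∀ acc, q ∈ L.foldl step acc := by
  intro L
  induction L with
  | nil => intro h; simp at h
  | cons a L ih =>
    intro hmem acc
    simp only [List.foldl_cons]
    rcases List.mem_cons.mp hmem with rfl | hi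
    · exact foldl_step_sub step hs L _ (hq acc)
    · exact ih hi _

theorem pyGetD_line_eq (line : List (List Int)) (i : Nat) (hi : i < line.length) :
    PySem.List.pyGetD line (i : Int) [] = (line)[i] := by
  simp [PySem.List.pyGetD_natCast, List.getD_eq_getElem?_getD, List.getElem?_eq_getElem hi]

theorem ptsB_ne_nil (line : List (List Int)) (h : Pre_solution line) : ptsB line ≠ [] := by
  obtain ⟨hlen, a, ha, b, hb, hab⟩ := h
  obtain ⟨ia, hia, hga⟩ := List.mem_iff_getElem.mp ha
  obtain ⟨ib, hib, hgb⟩ := List.mem_iff_getElem.mp hb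
  have key : ∀ (i j : Nat), i < line.length → j < line.length → i ≤ j →
      pvSolvable (PySem.List.pyGetD line (i:Int) []) (PySem.List.pyGetD line (j:Int) []) = true →
      ptsB line ≠ [] := by
    intro i j hi hj hij hsol
    have hsome : (solveB (PySem.List.pyGetD line (i:Int) []) (PySem.List.pyGetD line (j:Int) [])).isSome := by
      rw [← pvSolvable_isSome]; exact hsol
    obtain ⟨q, hq⟩ := Option.isSome_iff_exists.mp hsome
    have hmemQ : q ∈ ptsB line := by
      unfold ptsB
      have hsubO : ∀ (acc : List (Int × Int)) (ii : Int), acc ⊆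
          (PySem.List.pyRange ii (line.length:Int) 1).foldl (fun acc jj =>
            match solveB (PySem.List.pyGetD line ii []) (PySem.List.pyGetD line jj []) with
            | some s => acc ++ [s] | none => acc) acc := by
        intro acc ii
        apply foldl_step_sub
        intro acc2 jj
        cases hsb : solveB (PySem.List.pyGetD line ii []) (PySem.List.pyGetD line jj []) <;> simp [hsb]
      have hinner : ∀ (acc : List (Int × Int)), q ∈
          (PySem.List.pyRange (i:Int) (line.length:Int) 1).foldl (fun acc jj =>
            match solveB (PySem.List.pyGetD line (i:Int) []) (PySem.List.pyGetD line jj []) with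
            | some s => acc ++ [s] | none => acc) acc := by
        intro acc
        refine mem_foldl_step (i := (j : Int)) _ ?_ ?_ _ ?_ acc
        · intro acc2 jj
          cases hsb : solveB (PySem.List.pyGetD line (i:Int) []) (PySem.List.pyGetD line jj []) <;> simp [hsb]
        · intro acc2
          simp only [hq]; simp
        · rw [PySem.List.mem_pyRange_one]; exact ⟨by exact_mod_cast hij, by exact_mod_cast hj⟩
      refine mem_foldl_step (i := (i : Int)) _ hsubO ?_ _ ?_ []
      · intro acc; exact hinner acc
      · rw [PySem.List.mem_pyRange_one]; exact ⟨by positivity, by exact_mod_cast hi⟩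
    intro hnil
    rw [hnil] at hmemQ
    simp at hmemQ
  rcases Nat.le_total ia ib with hle | hle
  · exact key ia ib hia hib hle (by rw [pyGetD_line_eq line ia hia, pyGetD_line_eq line ib hib, hga, hgb]; exact hab)
  · exact key ib ia hib hia hle (by rw [pyGetD_line_eq line ib hib, pyGetD_line_eq line ia hia, hgb, hga]; exact pvSolvable_symm _ _ hab)

theorem boundsB_eq (rest : List (Int × Int)) : ∀ (a b c d : Int),
    rest.foldl (fun (b : Int × Int × Int × Int) (p : Int × Int) =>
      (if p.1 < b.1 then p.1 else b.1,
       if p.1 > b.2.1 then p.1 else b.2.1,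
       if p.2 < b.2.2.1 then p.2 else b.2.2.1,
       if p.2 > b.2.2.2 then p.2 else b.2.2.2)) (a, b, c, d)
    = (rest.foldl (fun m p => min m p.1) a,
       rest.foldl (fun m p => max m p.1) b,
       rest.foldl (fun m p => min m p.2) c,
       rest.foldl (fun m p => max m p.2) d) := by
  induction rest with
  | nil => intro a b c d; simp
  | cons p t ih =>
    intro a b c d
    simp only [List.foldl_cons]
    rw [show (if p.1 < a then p.1 else a) = min a p.1 from by rcases lt_or_ge p.1 a with h | h <;> simp [min_def] <;> omega,
        show (if p.1 > b then p.1 else b) = max b p.1 from by rcases lt_or_ge b p.1 with h | h <;> simp [max_def] <;> omega,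
        show (if p.2 < c then p.2 else c) = min c p.2 from by rcases lt_or_ge p.2 c with h | h <;> simp [min_def] <;> omega,
        show (if p.2 > d then p.2 else d) = max d p.2 from by rcases lt_or_ge d p.2 with h | h <;> simp [max_def] <;> omega]
    exact ih _ _ _ _

theorem foldl_min_spec {α : Type} (k : α → Int) (l : List α) : ∀ (a : Int),
    (l.foldl (fun m p => min m (k p)) a = a ∨ ∃ p ∈ l, l.foldl (fun m p => min m (k p)) a = k p) ∧
    l.foldl (fun m p => min m (k p)) a ≤ a ∧ ∀ p ∈ l, l.foldl (fun m p => min m (k p)) a ≤ k p := by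
  induction l with
  | nil => intro a; simp
  | cons x t ih =>
    intro a
    simp only [List.foldl_cons]
    obtain ⟨hmem, hle, hall⟩ := ih (min a (k x))
    refine ⟨?_, le_trans hle (min_le_left _ _), ?_⟩
    · rcases hmem with h | ⟨p, hp, h⟩
      · rcases le_total a (k x) with hx | hx
        · left; rw [h, min_eq_left hx]
        · right; exact ⟨x, by simp, by rw [h, min_eq_right hx]⟩
      · right; exact ⟨p, by simp [hp], h⟩
    · intro p hp
      rcases List.mem_cons.mp hp with rfl | hp
      · exact le_trans hle (min_le_right _ _)
      · exact hall p hp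

theorem foldl_max_spec {α : Type} (k : α → Int) (l : List α) : ∀ (a : Int),
    (l.foldl (fun m p => max m (k p)) a = a ∨ ∃ p ∈ l, l.foldl (fun m p => max m (k p)) a = k p) ∧
    a ≤ l.foldl (fun m p => max m (k p)) a ∧ ∀ p ∈ l, k p ≤ l.foldl (fun m p => max m (k p)) a := by
  induction l with
  | nil => intro a; simp
  | cons x t ih =>
    intro a
    simp only [List.foldl_cons]
    obtain ⟨hmem, hle, hall⟩ := ih (max a (k x))
    refine ⟨?_, le_trans (le_max_left _ _) hle, ?_⟩
    · rcases hmem with h | ⟨p, hp, h⟩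
      · rcases le_total a (k x) with hx | hx
        · right; exact ⟨x, by simp, by rw [h, max_eq_right hx]⟩
        · left; rw [h, max_eq_left hx]
      · right; exact ⟨p, by simp [hp], h⟩
    · intro p hp
      rcases List.mem_cons.mp hp with rfl | hp
      · exact le_trans (le_max_right _ _) hle
      · exact hall p hp

-- head and last of a stably key-sorted list are key-minimal / key-maximal members
theorem sorted_head_spec {α : Type} (xs : List α) (key : α → Int) {m : α} {t : List α}
    (h : PySem.List.sorted xs key false = m :: t) :
    m ∈ xs ∧ ∀ x ∈ xs, key m ≤ key x := by
  constructor
  · have : m ∈ PySem.List.sorted xs key false := by rw [h]; simp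
    rwa [PySem.List.mem_sorted xs key false m] at this
  · exact PySem.List.key_head_sorted_le xs key h

theorem pairwise_getLast {α : Type} {R : α → α → Prop} (l : List α) (hp : l.Pairwise R)
    (hne : l ≠ []) : ∀ x ∈ l, x = l.getLast hne ∨ R x (l.getLast hne) := by
  induction l with
  | nil => simp at hne
  | cons a t ih =>
    intro x hx
    rcases List.mem_cons.mp hx with rfl | hx
    · cases t with
      | nil => left; simp [List.getLast]
      | cons b s =>
        right
        rw [List.getLast_cons (by simp)]
        exact (List.pairwise_cons.mp hp).1 _ (List.getLast_mem _)
    · have hne2 : t ≠ [] := by intro hh; rw [hh] at hx; simp at hx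
      rw [List.getLast_cons hne2]
      exact ih (List.pairwise_cons.mp hp).2 hne2 x hx

theorem sorted_last_spec {α : Type} (xs : List α) (key : α → Int)
    (hne : PySem.List.sorted xs key false ≠ []) :
    (PySem.List.sorted xs key false).getLast hne ∈ xs ∧
    ∀ x ∈ xs, key x ≤ key ((PySem.List.sorted xs key false).getLast hne) := by
  constructor
  · rw [← PySem.List.mem_sorted xs key false]
    exact List.getLast_mem hne
  · intro x hx
    rw [← PySem.List.mem_sorted xs key false x] at hx
    rcases pairwise_getLast _ (PySem.List.sorted_pairwise xs key) hne x hx with h | h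
    · rw [h]
    · exact h

theorem pyGetD_nonneg_getD {α : Type} (xs : List α) (i : Int) (d : α) (h : 0 ≤ i) :
    PySem.List.pyGetD xs i d = xs.getD i.toNat d := by
  simp only [PySem.List.pyGetD, PySem.List.pyGet?_of_nonneg (xs := xs) h, List.getD_eq_getElem?_getD]
def cellGet (g : List (List String)) (r c : Nat) : Option String :=
  g[r]?.bind (fun row => row[c]?)

theorem cell_set (g : List (List String)) (rn cn r c : Nat) :
    cellGet (g.set rn ((g.getD rn []).set cn "*")) r c =
    if rn = r ∧ cn = c then (cellGet g r c).map (fun _ => "*") else cellGet g r c := by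
  by_cases hr : rn < g.length
  · have hrow : g.getD rn [] = g[rn]'hr := List.getD_eq_getElem g [] hr
    simp only [cellGet, List.getElem?_set, hrow]
    by_cases h1 : rn = r
    · subst h1
      simp only [if_pos rfl, hr, if_true, reduceIte, Option.bind_some,
        List.getElem?_eq_getElem hr, true_and, List.getElem?_set]
      by_cases h2 : cn = c
      · subst h2
        simp only [if_pos rfl, reduceIte]
        by_cases hc : cn < (g[rn]'hr).length
        · simp [hc, List.getElem?_eq_getElem hc]
        · simp only [hc, if_false, reduceIte]
          rw [List.getElem?_eq_none_iff.mpr (by omega)]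
          rfl
      · simp [h2]
    · simp [h1]
  · have hno : g.set rn ((g.getD rn []).set cn "*") = g := List.set_eq_of_length_le (by omega)
    rw [hno]
    by_cases h1 : rn = r ∧ cn = c
    · obtain ⟨rfl, rfl⟩ := h1
      rw [if_pos ⟨rfl, rfl⟩]
      unfold cellGet
      rw [List.getElem?_eq_none_iff.mpr (by omega)]
      rfl
    · simp [h1]
theorem cell_foldA (maxy minx : Int) (ps : List (List Int)) :
    ∀ (g : List (List String)),
    (∀ p ∈ ps, PySem.List.pyGetD p 1 0 ≤ maxy) →
    (∀ p ∈ ps, minx ≤ PySem.List.pyGetD p 0 0) →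
    ∀ (r c : Nat),
    cellGet (ps.foldl (fun ans p =>
      PySem.List.pySetD ans (-(PySem.List.pyGetD p 1 0) + maxy)
        (PySem.List.pySetD (PySem.List.pyGetD ans (-(PySem.List.pyGetD p 1 0) + maxy) [])
          (PySem.List.pyGetD p 0 0 - minx) "*")) g) r c =
    if ∃ p ∈ ps, (maxy - PySem.List.pyGetD p 1 0).toNat = r ∧ (PySem.List.pyGetD p 0 0 - minx).toNat = c
    then (cellGet g r c).map (fun _ => "*") else cellGet g r c := by
  induction ps with
  | nil => intro g _ _ r c; simp
  | cons p t ih =>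
    intro g hy hx r c
    have hy0 : PySem.List.pyGetD p 1 0 ≤ maxy := hy p (by simp)
    have hx0 : minx ≤ PySem.List.pyGetD p 0 0 := hx p (by simp)
    simp only [List.foldl_cons]
    have hupd : (PySem.List.pySetD g (-(PySem.List.pyGetD p 1 0) + maxy)
        (PySem.List.pySetD (PySem.List.pyGetD g (-(PySem.List.pyGetD p 1 0) + maxy) [])
          (PySem.List.pyGetD p 0 0 - minx) "*")) =
        g.set (maxy - PySem.List.pyGetD p 1 0).toNat
          ((g.getD (maxy - PySem.List.pyGetD p 1 0).toNat []).set
            (PySem.List.pyGetD p 0 0 - minx).toNat "*") := by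
      rw [show -(PySem.List.pyGetD p 1 0) + maxy = maxy - PySem.List.pyGetD p 1 0 from by ring]
      rw [PySem.List.pySetD_of_nonneg (i := maxy - PySem.List.pyGetD p 1 0) _ _ (by omega),
          PySem.List.pySetD_of_nonneg (i := PySem.List.pyGetD p 0 0 - minx) _ _ (by omega),
          pyGetD_nonneg_getD g (maxy - PySem.List.pyGetD p 1 0) [] (by omega)]
    rw [hupd, ih _ (fun q hq => hy q (by simp [hq])) (fun q hq => hx q (by simp [hq])) r c,
        cell_set]
    by_cases hpc : (maxy - PySem.List.pyGetD p 1 0).toNat = r ∧ (PySem.List.pyGetD p 0 0 - minx).toNat = c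
    · by_cases ht : ∃ q ∈ t, (maxy - PySem.List.pyGetD q 1 0).toNat = r ∧ (PySem.List.pyGetD q 0 0 - minx).toNat = c
      · rw [if_pos ht, if_pos hpc, if_pos (by simp; right; exact ht)]
        cases cellGet g r c <;> rfl
      · rw [if_neg ht, if_pos hpc, if_pos (by simp; left; exact hpc)]
    · by_cases ht : ∃ q ∈ t, (maxy - PySem.List.pyGetD q 1 0).toNat = r ∧ (PySem.List.pyGetD q 0 0 - minx).toNat = c
      · rw [if_pos ht, if_neg hpc, if_pos (by simp; right; exact ht)]
      · rw [if_neg ht, if_neg hpc, if_neg (by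
          rintro ⟨q, hqmem, hcond⟩
          rcases List.mem_cons.mp hqmem with rfl | hq
          · exact hpc hcond
          · exact ht ⟨q, hq, hcond⟩)]

theorem length_eq_of_isSome {α : Type} (l : List α) (C : Nat)
    (h : ∀ c : Nat, l[c]?.isSome ↔ c < C) : l.length = C := by
  have h1 := h l.length
  have h2 := h C
  simp [List.getElem?_eq_none_iff.mpr (le_refl l.length)] at h1
  by_cases hc : C < l.length
  · simp [List.getElem?_eq_getElem hc] at h2
  · omega

theorem cell_init (miny maxy minx maxx : Int) (r c : Nat) :
    cellGet ((PySem.List.pyRange miny (maxy+1) 1).map (fun _ =>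
      (PySem.List.pyRange minx (maxx+1) 1).map (fun _ => ("." : String)))) r c =
    if r < (maxy + 1 - miny).toNat ∧ c < (maxx + 1 - minx).toNat then some "." else none := by
  unfold cellGet
  by_cases hr : r < (maxy + 1 - miny).toNat
  · rw [List.getElem?_map, PySem.List.getElem?_pyRange_one, if_pos hr]
    simp only [Option.map_some, Option.bind_some]
    by_cases hc : c < (maxx + 1 - minx).toNat
    · rw [List.getElem?_map, PySem.List.getElem?_pyRange_one, if_pos hc, if_pos ⟨hr, hc⟩]
      rfl
    · rw [List.getElem?_map, PySem.List.getElem?_pyRange_one, if_neg hc, if_neg (by tauto)]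
      rfl
  · rw [List.getElem?_eq_none_iff.mpr (by simp [PySem.List.length_pyRange_one]; omega)]
    rw [if_neg (by tauto)]
    rfl

theorem foldA_length (maxy minx : Int) (ps : List (List Int)) :
    ∀ (g : List (List String)),
    (ps.foldl (fun ans p =>
      PySem.List.pySetD ans (-(PySem.List.pyGetD p 1 0) + maxy)
        (PySem.List.pySetD (PySem.List.pyGetD ans (-(PySem.List.pyGetD p 1 0) + maxy) [])
          (PySem.List.pyGetD p 0 0 - minx) "*")) g).length = g.length := by
  induction ps with
  | nil => intro g; rfl
  | cons p t ih =>
    intro g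
    simp only [List.foldl_cons]
    rw [ih, PySem.List.length_pySetD]

theorem pyGetD_pair0 (a b : Int) : PySem.List.pyGetD [a, b] 0 0 = a := by
  rw [pyGetD_nonneg_getD _ _ _ (by omega)]; rfl

theorem pyGetD_pair1 (a b : Int) : PySem.List.pyGetD [a, b] 1 0 = b := by
  rw [pyGetD_nonneg_getD _ _ _ (by omega)]; rfl

theorem min_attained {α : Type} (k : α → Int) (p0 : α) (rest : List α) :
    (∃ q ∈ p0 :: rest, rest.foldl (fun m p => min m (k p)) (k p0) = k q) ∧
    (∀ q ∈ p0 :: rest, rest.foldl (fun m p => min m (k p)) (k p0) ≤ k q) := by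
  obtain ⟨hmem, hle, hall⟩ := foldl_min_spec k rest (k p0)
  constructor
  · rcases hmem with h | ⟨p, hp, h⟩
    · exact ⟨p0, by simp, h⟩
    · exact ⟨p, by simp [hp], h⟩
  · intro q hq
    rcases List.mem_cons.mp hq with rfl | hq
    · exact hle
    · exact hall q hq

theorem max_attained {α : Type} (k : α → Int) (p0 : α) (rest : List α) :
    (∃ q ∈ p0 :: rest, rest.foldl (fun m p => max m (k p)) (k p0) = k q) ∧
    (∀ q ∈ p0 :: rest, k q ≤ rest.foldl (fun m p => max m (k p)) (k p0)) := by
  obtain ⟨hmem, hle, hall⟩ := foldl_max_spec k rest (k p0)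
  constructor
  · rcases hmem with h | ⟨p, hp, h⟩
    · exact ⟨p0, by simp, h⟩
    · exact ⟨p, by simp [hp], h⟩
  · intro q hq
    rcases List.mem_cons.mp hq with rfl | hq
    · exact hle
    · exact hall q hq

theorem contains_ofList_iff (xs : List (Int × Int)) (z : Int × Int) :
    PySem.Set.contains (PySem.Set.ofList xs) z = true ↔ z ∈ xs := by
  simp [PySem.Set.contains, PySem.Set.mem_ofList]

theorem solution_eq (line : List (List Int)) (hpre : Pre_solution line) :
    solution line = solution_alt line := by
  obtain hne := ptsB_ne_nil line hpre
  obtain ⟨p0, rest, hpts⟩ := List.exists_cons_of_ne_nil hne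
  have hinter : interA line = (p0 :: rest).map (fun p => [p.1, p.2]) := by
    rw [inter_eq, hpts]
  -- the four bounds computed by B
  set MINX := rest.foldl (fun m p => min m p.1) p0.1 with hMINX
  set MAXX := rest.foldl (fun m p => max m p.1) p0.1 with hMAXX
  set MINY := rest.foldl (fun m p => min m p.2) p0.2 with hMINY
  set MAXY := rest.foldl (fun m p => max m p.2) p0.2 with hMAXY
  obtain ⟨⟨qx, hqx, hqxe⟩, hminxall⟩ := min_attained Prod.fst p0 rest
  obtain ⟨⟨qX, hqX, hqXe⟩, hmaxxall⟩ := max_attained Prod.fst p0 rest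
  obtain ⟨⟨qy, hqy, hqye⟩, hminyall⟩ := min_attained Prod.snd p0 rest
  obtain ⟨⟨qY, hqY, hqYe⟩, hmaxyall⟩ := max_attained Prod.snd p0 rest
  -- B's output
  have hB : solution_alt line =
      (PySem.List.pyRange MAXY (MINY - 1) (-1)).map (fun y =>
        PySem.Str.join "" ((PySem.List.pyRange MINX (MAXX + 1) 1).map (fun x =>
          if PySem.Set.contains (PySem.Set.ofList (p0 :: rest)) (x, y) then "*" else "."))) := by
    simp only [solution_alt, hpts]
    rw [boundsB_eq]
  -- A's sorted lists
  set s1 := PySem.List.sorted (interA line) (fun x => PySem.List.pyGetD x 1 0) false with hs1def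
  have hs1ne : s1 ≠ [] := by
    intro h
    have := PySem.List.length_sorted (interA line) (fun x => PySem.List.pyGetD x 1 0) false
    rw [← hs1def, h, hinter] at this
    simp at this
  obtain ⟨m1, t1, hm1⟩ := List.exists_cons_of_ne_nil hs1ne
  have hg10 : PySem.List.pyGet? s1 0 = some m1 := by rw [hm1]; exact PySem.List.pyGet?_zero_cons _ _
  have hg1l : PySem.List.pyGet? s1 (-1) = some (s1.getLast hs1ne) := by
    rw [PySem.List.pyGet?_neg_one, List.getLast?_eq_getLast]
  set s2 := PySem.List.sorted s1 (fun x => PySem.List.pyGetD x 0 0) false with hs2def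
  have hs2ne : s2 ≠ [] := by
    intro h
    have := PySem.List.length_sorted s1 (fun x => PySem.List.pyGetD x 0 0) false
    rw [← hs2def, h, hm1] at this
    simp at this
  obtain ⟨m2, t2, hm2⟩ := List.exists_cons_of_ne_nil hs2ne
  have hg20 : PySem.List.pyGet? s2 0 = some m2 := by rw [hm2]; exact PySem.List.pyGet?_zero_cons _ _
  have hg2l : PySem.List.pyGet? s2 (-1) = some (s2.getLast hs2ne) := by
    rw [PySem.List.pyGet?_neg_one, List.getLast?_eq_getLast]
  -- membership characterisations
  have hmem1 : ∀ p, p ∈ s1 ↔ ∃ q ∈ p0 :: rest, p = [q.1, q.2] := by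
    intro p
    rw [hs1def, PySem.List.mem_sorted, hinter, List.mem_map]
    constructor
    · rintro ⟨q, hq, rfl⟩; exact ⟨q, hq, rfl⟩
    · rintro ⟨q, hq, rfl⟩; exact ⟨q, hq, rfl⟩
  have hmem2 : ∀ p, p ∈ s2 ↔ ∃ q ∈ p0 :: rest, p = [q.1, q.2] := by
    intro p
    rw [hs2def, PySem.List.mem_sorted]
    exact hmem1 p
  -- A's four bounds equal B's
  have hminyA : PySem.List.pyGetD m1 1 0 = MINY := by
    obtain ⟨hm1mem, hm1le⟩ := sorted_head_spec (interA line) (fun x => PySem.List.pyGetD x 1 0)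
      (show PySem.List.sorted (interA line) (fun x => PySem.List.pyGetD x 1 0) false = m1 :: t1 from hm1)
    obtain ⟨q1, hq1, rfl⟩ := (hmem1 m1).mp (by rw [hm1]; simp)
    rw [pyGetD_pair1]
    have h1 : q1.2 ≤ MINY := by
      have := hm1le [qy.1, qy.2] (by rw [hinter]; exact List.mem_map.mpr ⟨qy, hqy, rfl⟩)
      rw [pyGetD_pair1, pyGetD_pair1] at this
      omega
    have h2 : MINY ≤ q1.2 := hminyall q1 hq1
    omega
  have hmaxyA : PySem.List.pyGetD (s1.getLast hs1ne) 1 0 = MAXY := by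
    obtain ⟨hlmem, hlle⟩ := sorted_last_spec (interA line) (fun x => PySem.List.pyGetD x 1 0)
      (show PySem.List.sorted (interA line) (fun x => PySem.List.pyGetD x 1 0) false ≠ [] from hs1ne)
    have hLmem : s1.getLast hs1ne ∈ s1 := List.getLast_mem hs1ne
    obtain ⟨q1, hq1, hq1e⟩ := (hmem1 _).mp hLmem
    have he : s1.getLast hs1ne = [q1.1, q1.2] := hq1e
    rw [he, pyGetD_pair1]
    have h1 : MAXY ≤ q1.2 := by
      have h := hlle [qY.1, qY.2] (by rw [hinter]; exact List.mem_map.mpr ⟨qY, hqY, rfl⟩)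
      rw [show (PySem.List.sorted (interA line) (fun x => PySem.List.pyGetD x 1 0) false).getLast
          (show PySem.List.sorted (interA line) (fun x => PySem.List.pyGetD x 1 0) false ≠ [] from hs1ne)
          = [q1.1, q1.2] from he, pyGetD_pair1, pyGetD_pair1] at h
      omega
    have h2 : q1.2 ≤ MAXY := hmaxyall q1 hq1
    omega
  have hminxA : PySem.List.pyGetD m2 0 0 = MINX := by
    obtain ⟨hm2mem, hm2le⟩ := sorted_head_spec s1 (fun x => PySem.List.pyGetD x 0 0)
      (show PySem.List.sorted s1 (fun x => PySem.List.pyGetD x 0 0) false = m2 :: t2 from hm2)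
    obtain ⟨q1, hq1, rfl⟩ := (hmem2 m2).mp (by rw [hm2]; simp)
    rw [pyGetD_pair0]
    have h1 : q1.1 ≤ MINX := by
      have := hm2le [qx.1, qx.2] ((hmem1 _).mpr ⟨qx, hqx, rfl⟩)
      rw [pyGetD_pair0, pyGetD_pair0] at this
      omega
    have h2 : MINX ≤ q1.1 := hminxall q1 hq1
    omega
  have hmaxxA : PySem.List.pyGetD (s2.getLast hs2ne) 0 0 = MAXX := by
    obtain ⟨hlmem, hlle⟩ := sorted_last_spec s1 (fun x => PySem.List.pyGetD x 0 0)
      (show PySem.List.sorted s1 (fun x => PySem.List.pyGetD x 0 0) false ≠ [] from hs2ne)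
    have hLmem : s2.getLast hs2ne ∈ s2 := List.getLast_mem hs2ne
    obtain ⟨q1, hq1, hq1e⟩ := (hmem2 _).mp hLmem
    have he : s2.getLast hs2ne = [q1.1, q1.2] := hq1e
    rw [he, pyGetD_pair0]
    have h1 : MAXX ≤ q1.1 := by
      have h := hlle [qX.1, qX.2] ((hmem1 _).mpr ⟨qX, hqX, rfl⟩)
      rw [show (PySem.List.sorted s1 (fun x => PySem.List.pyGetD x 0 0) false).getLast
          (show PySem.List.sorted s1 (fun x => PySem.List.pyGetD x 0 0) false ≠ [] from hs2ne)
          = [q1.1, q1.2] from he, pyGetD_pair0, pyGetD_pair0] at h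
      omega
    have h2 : q1.1 ≤ MAXX := hmaxxall q1 hq1
    omega
  -- A's output
  have hA : solution line =
      (PySem.List.pyRange 0 (((s2.foldl (fun ans p =>
        PySem.List.pySetD ans (-(PySem.List.pyGetD p 1 0) + MAXY)
          (PySem.List.pySetD (PySem.List.pyGetD ans (-(PySem.List.pyGetD p 1 0) + MAXY) [])
            (PySem.List.pyGetD p 0 0 - MINX) "*")) ((PySem.List.pyRange MINY (MAXY+1) 1).map (fun _ =>
        (PySem.List.pyRange MINX (MAXX+1) 1).map (fun _ => ("." : String))))).length : Int)) 1).map (fun i =>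
        PySem.Str.join "" (PySem.List.pyGetD (s2.foldl (fun ans p =>
        PySem.List.pySetD ans (-(PySem.List.pyGetD p 1 0) + MAXY)
          (PySem.List.pySetD (PySem.List.pyGetD ans (-(PySem.List.pyGetD p 1 0) + MAXY) [])
            (PySem.List.pyGetD p 0 0 - MINX) "*")) ((PySem.List.pyRange MINY (MAXY+1) 1).map (fun _ =>
        (PySem.List.pyRange MINX (MAXX+1) 1).map (fun _ => ("." : String))))) i [])) := by
    simp only [solution, ← hs1def, hg10, hg1l, ← hs2def, hg20, hg2l, hminyA, hmaxyA, hminxA, hmaxxA]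
  rw [hA, hB]
  -- shared facts
  have hyleM : ∀ p ∈ s2, PySem.List.pyGetD p 1 0 ≤ MAXY := by
    intro p hp
    obtain ⟨q, hq, rfl⟩ := (hmem2 p).mp hp
    rw [pyGetD_pair1]; exact hmaxyall q hq
  have hxgeM : ∀ p ∈ s2, MINX ≤ PySem.List.pyGetD p 0 0 := by
    intro p hp
    obtain ⟨q, hq, rfl⟩ := (hmem2 p).mp hp
    rw [pyGetD_pair0]; exact hminxall q hq
  have hyx : MINY ≤ MAXY := le_trans (hminyall p0 (by simp)) (hmaxyall p0 (by simp))
  have hxx : MINX ≤ MAXX := le_trans (hminxall p0 (by simp)) (hmaxxall p0 (by simp))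
  set answer0 := (PySem.List.pyRange MINY (MAXY+1) 1).map (fun _ =>
      (PySem.List.pyRange MINX (MAXX+1) 1).map (fun _ => ("." : String))) with hans0
  set ANS := s2.foldl (fun ans p =>
      PySem.List.pySetD ans (-(PySem.List.pyGetD p 1 0) + MAXY)
        (PySem.List.pySetD (PySem.List.pyGetD ans (-(PySem.List.pyGetD p 1 0) + MAXY) [])
          (PySem.List.pyGetD p 0 0 - MINX) "*")) answer0 with hANS
  have hlen0 : answer0.length = (MAXY + 1 - MINY).toNat := by
    rw [hans0, List.length_map, PySem.List.length_pyRange_one]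
  have hlenA : ANS.length = (MAXY + 1 - MINY).toNat := by
    rw [hANS, foldA_length, hlen0]
  have hcell : ∀ r c : Nat, cellGet ANS r c =
      if ∃ p ∈ s2, (MAXY - PySem.List.pyGetD p 1 0).toNat = r ∧ (PySem.List.pyGetD p 0 0 - MINX).toNat = c
      then (if r < (MAXY + 1 - MINY).toNat ∧ c < (MAXX + 1 - MINX).toNat then some "." else none).map (fun _ => "*")
      else (if r < (MAXY + 1 - MINY).toNat ∧ c < (MAXX + 1 - MINX).toNat then some "." else none) := by
    intro r c
    rw [hANS, cell_foldA MAXY MINX s2 answer0 hyleM hxgeM r c, hans0, cell_init]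
  -- LHS to a plain map over the rows
  rw [show (fun i => PySem.Str.join "" (PySem.List.pyGetD ANS i [])) =
      (fun row => PySem.Str.join "" row) ∘ (fun i => PySem.List.pyGetD ANS i []) from rfl,
    ← List.map_map, PySem.List.map_pyGetD_pyRange_zero']
  -- RHS to a map over List.range
  rw [PySem.List.pyRange_neg_one, List.map_map,
    show MAXY - (MINY - 1) = MAXY + 1 - MINY from by ring]
  apply List.ext_getElem
  · simp [hlenA]
  · intro n h1 h2
    rw [List.getElem_map, List.getElem_map, Function.comp, List.getElem_range]
    have hn : n < (MAXY + 1 - MINY).toNat := by simpa [hlenA] using h1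
    congr 1
    -- row equality
    have hrowsome : ANS[n]? = some (ANS[n]'(by omega)) := List.getElem?_eq_getElem _
    have hrowc : ∀ c : Nat, (ANS[n]'(by omega))[c]? = cellGet ANS n c := by
      intro c
      rw [cellGet, hrowsome]
      rfl
    have hstar : ∀ c : Nat,
        (∃ p ∈ s2, (MAXY - PySem.List.pyGetD p 1 0).toNat = n ∧ (PySem.List.pyGetD p 0 0 - MINX).toNat = c) ↔
        (c < (MAXX + 1 - MINX).toNat ∧ ((MINX + (c : Int), MAXY - (n : Int)) ∈ p0 :: rest)) := by
      intro c
      constructor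
      · rintro ⟨p, hp, hr, hc⟩
        obtain ⟨q, hq, rfl⟩ := (hmem2 p).mp hp
        rw [pyGetD_pair0, pyGetD_pair1] at *
        have b1 : MINY ≤ q.2 := hminyall q hq
        have b2 : q.2 ≤ MAXY := hmaxyall q hq
        have b3 : MINX ≤ q.1 := hminxall q hq
        have b4 : q.1 ≤ MAXX := hmaxxall q hq
        have hq1 : q.1 = MINX + (c : Int) := by omega
        have hq2 : q.2 = MAXY - (n : Int) := by omega
        exact ⟨by omega, by rw [← hq1, ← hq2]; exact hq⟩
      · rintro ⟨hcC, hmem⟩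
        refine ⟨[MINX + (c : Int), MAXY - (n : Int)], (hmem2 _).mpr ⟨_, hmem, rfl⟩, ?_, ?_⟩
        · rw [pyGetD_pair1]; omega
        · rw [pyGetD_pair0]; omega
    have hrowlen : (ANS[n]'(by omega)).length = (MAXX + 1 - MINX).toNat := by
      apply length_eq_of_isSome
      intro c
      rw [hrowc c, hcell n c]
      constructor
      · intro hs
        by_cases hex : ∃ p ∈ s2, (MAXY - PySem.List.pyGetD p 1 0).toNat = n ∧ (PySem.List.pyGetD p 0 0 - MINX).toNat = c
        · exact ((hstar c).mp hex).1
        · rw [if_neg hex] at hs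
          by_cases hrc : n < (MAXY + 1 - MINY).toNat ∧ c < (MAXX + 1 - MINX).toNat
          · exact hrc.2
          · rw [if_neg hrc] at hs; simp at hs
      · intro hcC
        by_cases hex : ∃ p ∈ s2, (MAXY - PySem.List.pyGetD p 1 0).toNat = n ∧ (PySem.List.pyGetD p 0 0 - MINX).toNat = c
        · rw [if_pos hex, if_pos ⟨hn, hcC⟩]; rfl
        · rw [if_neg hex, if_pos ⟨hn, hcC⟩]; rfl
    apply List.ext_getElem
    · rw [hrowlen, List.length_map, PySem.List.length_pyRange_one]
    · intro c hc1 hc2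
      have hcC : c < (MAXX + 1 - MINX).toNat := by rwa [hrowlen] at hc1
      rw [List.getElem_map, PySem.List.getElem_pyRange_one]
      have hval : (ANS[n]'(by omega))[c]? =
          if (MINX + (c : Int), MAXY - (n : Int)) ∈ p0 :: rest then some "*" else some "." := by
        rw [hrowc c, hcell n c]
        by_cases hmem : (MINX + (c : Int), MAXY - (n : Int)) ∈ p0 :: rest
        · rw [if_pos ((hstar c).mpr ⟨hcC, hmem⟩), if_pos ⟨hn, hcC⟩, if_pos hmem]; rfl
        · rw [if_neg (fun hex => hmem ((hstar c).mp hex).2), if_pos ⟨hn, hcC⟩, if_neg hmem]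
      have hval2 : (ANS[n]'(by omega))[c]? = some ((ANS[n]'(by omega))[c]'hc1) :=
        List.getElem?_eq_getElem _
      rw [hval] at hval2
      by_cases hmem : (MINX + (c : Int), MAXY - (n : Int)) ∈ p0 :: rest
      · rw [if_pos hmem] at hval2
        rw [if_pos ((contains_ofList_iff _ _).mpr hmem)]
        exact (Option.some_injective _ hval2).symm
      · rw [if_neg hmem] at hval2
        rw [if_neg (fun hcc => hmem ((contains_ofList_iff _ _).mp hcc))]
        exact (Option.some_injective _ hval2).symm


-- ===== VERDICT (by name: the statement is the Claim_ definition above) =====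
theorem solution_spec : Claim_equal_solution := by
  intro line _ hpre
  unfold Spec_solution
  exact solution_eq line hpre
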